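-- pv_equiv track=rewrite | github.com/nickstarform/Star-Bot | starbot/cogs/utilities/functions.py | lessen_list
-- ===== SOURCE A (Python) =====
-- def lessen_list(ilist: list, amount: int):
--     """Try to split list intelligently.
--
--     This is a highly specific command, but it takes
--     the input list, counts up the length of its
--     constituents, and tries to output a new
--     list of the same elements but for a
--     length specified by amount.
--
--     Example:
--         ilist = [1,2,3,4,5], amount = 3
--         yields [1,2,3]
--         ilist = [1,24,3,4,5], amount = 3
--         yields [1,24]
--         ilist = [1,242,3,4,5], amount = 3
--         yields [1]
--     Parameters
--     ----------
--     ilist: list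
--         list to modify
--     amount: int
--         max length of sum of parts
--
--     Returns
--     ----------
--     list
--         shortened list
--     """
--     sum_c = 0
--     sum_n = 0
--     i = 0
--     ret = []
--     while i < (len(ilist) - 1):
--         sum_c += len(str(ilist[i]))
--         sum_n = len(str(ilist[i + 1]))
--         ret.append(ilist[i])
--         if (sum_c > amount) or (sum([sum_c, sum_n]) > amount):
--             i = len(ilist)
--         i += 1
--     return ret
-- ===== SOURCE B (Python) =====
-- def lessen_list(ilist: list, amount: int):
--     """Shortened list whose constituents' string-lengths fit within amount.
--
--     Re-implementation via a prefix-sum table: prefix[k] is the total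
--     string-length of the first k elements; answer is ilist[:k-1] for the
--     first k in [2, n] with prefix[k] > amount, else ilist[:n-1].
--     """
--     n = len(ilist)
--     if n < 2:
--         return []
--     prefix = [0]
--     total = 0
--     for x in ilist:
--         total += len(str(x))
--         prefix.append(total)
--     for k in range(2, n + 1):
--         if prefix[k] > amount:
--             return ilist[:k - 1]
--     return ilist[:n - 1]
-- ===== Notes on version B (the rewrite author's own statement) =====
-- stated objective: simpler
-- what changed: Replaces A's single accumulating while-loop with lookahead sum_n and a break-by-index-jump by a two-phase approach: build a prefix-sum table of string lengths once, then return ilist[:k-1] at the first k with prefix[k] > amount (else ilist[:n-1]).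
import Mathlib
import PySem

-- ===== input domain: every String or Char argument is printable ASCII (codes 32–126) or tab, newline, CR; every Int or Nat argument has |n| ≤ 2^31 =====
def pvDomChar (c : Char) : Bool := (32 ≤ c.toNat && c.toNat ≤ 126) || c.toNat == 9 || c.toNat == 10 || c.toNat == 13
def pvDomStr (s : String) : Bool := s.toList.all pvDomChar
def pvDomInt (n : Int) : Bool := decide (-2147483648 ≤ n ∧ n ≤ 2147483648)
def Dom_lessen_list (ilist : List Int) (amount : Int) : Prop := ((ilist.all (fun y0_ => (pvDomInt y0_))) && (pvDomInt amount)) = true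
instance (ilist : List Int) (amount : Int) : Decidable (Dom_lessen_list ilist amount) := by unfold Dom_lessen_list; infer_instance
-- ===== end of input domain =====

-- B builds a prefix-sum table of string lengths and searches it for the first
-- index past the threshold, instead of A's accumulating loop with lookahead.
-- ===== PORT A =====
def lessenGo (ilist : List Int) (amount : Int) (sum_c : Int) (i : Nat) (ret : List Int) : List Int :=
  if _h : i + 1 < ilist.length then
    -- sum_c += len(str(ilist[i])); sum_n = len(str(ilist[i+1])); ret.append(ilist[i])
    let sum_c' := sum_c + ((PySem.Int.toStr (ilist.getD i 0)).length : Int)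
    let sum_n := ((PySem.Int.toStr (ilist.getD (i + 1) 0)).length : Int)
    let ret' := ret ++ [ilist.getD i 0]
    if sum_c' > amount ∨ sum_c' + sum_n > amount then ret'  -- i = len(ilist); loop exits
    else lessenGo ilist amount sum_c' (i + 1) ret'
  else ret
termination_by ilist.length - i

def lessen_list (ilist : List Int) (amount : Int) : List Int :=
  lessenGo ilist amount 0 0 []

-- ===== PORT B =====
-- in-range indexing prefix[k] ported as getD; slices ilist[:k-1], ilist[:n-1] have
-- nonnegative bounds here, ported as List.take
def altSearch (ilist : List Int) (amount : Int) (pre : List Int) (ks : List Nat) : List Int :=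
  match ks with
  | [] => ilist.take (ilist.length - 1)
  | k :: rest =>
    if pre.getD k 0 > amount then ilist.take (k - 1)
    else altSearch ilist amount pre rest

def lessen_list_alt (ilist : List Int) (amount : Int) : List Int :=
  if ilist.length < 2 then []
  else
    let st := ilist.foldl
      (fun (st : List Int × Int) x =>
        let total := st.2 + ((PySem.Int.toStr x).length : Int)
        (st.1 ++ [total], total)) ([(0 : Int)], 0)
    -- range(2, n + 1) ported as List.range' 2 (n - 1)
    altSearch ilist amount st.1 (List.range' 2 (ilist.length - 1))

-- ===== PRECONDITION & SPEC =====
def Spec_lessen_list (ilist : List Int) (amount : Int) (out : List Int) : Prop := out = lessen_list_alt ilist amount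
instance (ilist : List Int) (amount : Int) (out : List Int) : Decidable (Spec_lessen_list ilist amount out) := by unfold Spec_lessen_list; infer_instance

-- ===== CLAIM (what is proved, stated in full; the proofs are below) =====
def Claim_equal_lessen_list : Prop := ∀ (ilist : List Int) (amount : Int), Dom_lessen_list ilist amount → Spec_lessen_list ilist amount (lessen_list ilist amount)

-- ===== LEMMAS AND PROOFS =====
def pvLen (x : Int) : Int := ((PySem.Int.toStr x).length : Int)

def pvP (ilist : List Int) (k : Nat) : Int := ((ilist.take k).map pvLen).sum

-- pvP successor step
theorem pvP_succ (ilist : List Int) (i : Nat) (h : i < ilist.length) :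
    pvP ilist (i + 1) = pvP ilist i + pvLen (ilist.getD i 0) := by
  unfold pvP
  rw [List.map_take, List.map_take, List.take_add_one]
  simp [List.getD, List.getElem?_map, List.getElem?_eq_getElem h]

theorem pvLen_nonneg (x : Int) : 0 ≤ pvLen x := by
  simp [pvLen]

-- B's fold builds the prefix table
def pvPrefixes (t : Int) : List Int → List Int
  | [] => []
  | x :: xs => (t + pvLen x) :: pvPrefixes (t + pvLen x) xs

theorem fold_prefixes (l : List Int) (acc : List Int) (t : Int) :
    l.foldl (fun (st : List Int × Int) x =>
        let total := st.2 + ((PySem.Int.toStr x).length : Int)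
        (st.1 ++ [total], total)) (acc, t) = (acc ++ pvPrefixes t l, t + (l.map pvLen).sum) := by
  induction l generalizing acc t with
  | nil => simp [pvPrefixes]
  | cons x xs ih =>
    simp only [List.foldl_cons, pvPrefixes]
    rw [ih]
    simp [pvLen]
    ring

theorem prefixes_getD (l : List Int) (t : Int) (j : Nat) (h : j < l.length) :
    (pvPrefixes t l).getD j 0 = t + ((l.take (j + 1)).map pvLen).sum := by
  induction l generalizing t j with
  | nil => simp at h
  | cons x xs ih =>
    cases j with
    | zero => simp [pvPrefixes]
    | succ j =>
      simp only [pvPrefixes, List.getD]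
      have := ih (t + pvLen x) j (by simpa using h)
      simp only [List.getD] at this
      simp [this]
      ring

theorem pre_getD (ilist : List Int) (k : Nat) (hk : 1 ≤ k) (h : k ≤ ilist.length) :
    (([(0:Int)] ++ pvPrefixes 0 ilist).getD k 0) = pvP ilist k := by
  obtain ⟨j, rfl⟩ : ∃ j, k = j + 1 := ⟨k - 1, by omega⟩
  have : (([(0:Int)] ++ pvPrefixes 0 ilist).getD (j + 1) 0) = (pvPrefixes 0 ilist).getD j 0 := by
    simp [List.getD]
  rw [this, prefixes_getD ilist 0 j (by omega)]
  simp [pvP]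

-- the loop of A, started at index i with the running sum pvP i and output take i,
-- equals B's search over the remaining range
theorem go_eq_search (ilist : List Int) (amount : Int) (i : Nat)
    (hi : i + 1 ≤ ilist.length) :
    lessenGo ilist amount (pvP ilist i) i (ilist.take i) =
      altSearch ilist amount ([(0:Int)] ++ pvPrefixes 0 ilist)
        (List.range' (i + 2) (ilist.length - 1 - i)) := by
  induction hn : ilist.length - 1 - i generalizing i with
  | zero =>
    rw [lessenGo, dif_neg (by omega : ¬ (i + 1 < ilist.length))]
    have hi' : i = ilist.length - 1 := by omega
    simp [altSearch, hi']
  | succ n ih =>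
    have h1 : i + 1 < ilist.length := by omega
    have hg : ilist.getD i 0 = ilist[i] := List.getD_eq_getElem ilist 0 (by omega)
    have htake : ilist.take i ++ [ilist.getD i 0] = ilist.take (i + 1) := by
      rw [List.take_add_one, List.getElem?_eq_getElem (by omega : i < ilist.length), hg]
      rfl
    have hP1 := pvP_succ ilist i (by omega)
    have hP2 : pvP ilist (i + 2) = pvP ilist (i + 1) + pvLen (ilist.getD (i + 1) 0) :=
      pvP_succ ilist (i + 1) h1
    have hnn := pvLen_nonneg (ilist.getD (i + 1) 0)
    rw [lessenGo, dif_pos h1]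
    show (if pvP ilist i + pvLen (ilist.getD i 0) > amount ∨
            pvP ilist i + pvLen (ilist.getD i 0) + pvLen (ilist.getD (i + 1) 0) > amount
          then ilist.take i ++ [ilist.getD i 0]
          else lessenGo ilist amount (pvP ilist i + pvLen (ilist.getD i 0)) (i + 1)
            (ilist.take i ++ [ilist.getD i 0])) = _
    rw [← hP1, htake, List.range'_succ]
    simp only [altSearch]
    rw [pre_getD ilist (i + 2) (by omega) (by omega)]
    by_cases hc : pvP ilist (i + 2) > amount
    · rw [if_pos (by omega), if_pos hc, show i + 2 - 1 = i + 1 from by omega]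
    · rw [if_neg (by omega), if_neg hc, ih (i + 1) (by omega) (by omega),
        show i + 1 + 2 = i + 2 + 1 from by omega]

-- ===== VERDICT (by name: the statement is the Claim_ definition above) =====
theorem lessen_list_spec : Claim_equal_lessen_list := by
  intro ilist amount _
  unfold Spec_lessen_list lessen_list lessen_list_alt
  by_cases h2 : ilist.length < 2
  · rw [if_pos h2, lessenGo, dif_neg (by omega : ¬ (0 + 1 < ilist.length))]
  · rw [if_neg h2]
    show lessenGo ilist amount 0 0 [] =
      altSearch ilist amount
        (ilist.foldl
          (fun (st : List Int × Int) x =>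
            let total := st.2 + ((PySem.Int.toStr x).length : Int)
            (st.1 ++ [total], total)) ([(0 : Int)], 0)).1
        (List.range' 2 (ilist.length - 1))
    rw [fold_prefixes]
    have h0 := go_eq_search ilist amount 0 (by omega)
    have e0 : pvP ilist 0 = 0 := rfl
    rw [e0, List.take_zero] at h0
    simpa using h0
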